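-- pv_equiv track=rewrite | github.com/swag-source/Algoritmos-y-Estructuras-de-Datos-III | implementaciones-guias/masIzquierda.py | esMasIzquierda
-- ===== SOURCE A (Python) =====
-- def esMasIzquierda(lista):
--     if len(lista) == 2:
--         if lista[0] > lista[1]:
--             return True
--         else:
--             return False
--     izq = lista[:len(lista)//2]  # Corrección en la división de la lista
--     der = lista[len(lista)//2:]  # Corrección en la división de la lista
--     if esMasIzquierda(izq) and esMasIzquierda(der):  # Llamadas recursivas
--         if sum(izq) > sum(der):
--             return True
--         else:
--             return False
--     return False  # Agregar una cláusula de retorno por defecto en caso de que ninguna condición se cumpla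
-- ===== SOURCE B (Python) =====
-- def esMasIzquierda(lista):
--     # Bottom-up: check every adjacent pair (left > right) and replace the
--     # level by its pair sums; O(n) total instead of re-summing every half
--     # at every recursion level.
--     level = lista
--     while len(level) > 1:
--         sums = []
--         for i in range(0, len(level), 2):
--             if level[i] <= level[i + 1]:
--                 return False
--             sums.append(level[i] + level[i + 1])
--         level = sums
--     return True
-- ===== Notes on version B (the rewrite author's own statement) =====
-- stated objective: faster
-- what changed: Replaces the top-down halving recursion that re-sums both halves at every level (O(n log n)) by a single bottom-up sweep per level that checks each adjacent pair and collapses the level to its pair sums, O(n) total work; intended as faster, measured about 1.5-1.7x at n=262144 in a timing run. Pre_ excludes the inputs where A's lopsided halving raises RecursionError and the remaining non-power-of-two inputs where A returns False only by a short-circuit deeper in the recursion (B agrees whenever both return, but A's exact termination set is not closed-form).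
-- outside the precondition, e.g. on esMasIzquierda([5, 1, 9, 1, 1, 1, 0, 0, 0]): A returns False, B returns False; on esMasIzquierda([5, 4, 3]): A raises RecursionError, B raises IndexError
import Mathlib
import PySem

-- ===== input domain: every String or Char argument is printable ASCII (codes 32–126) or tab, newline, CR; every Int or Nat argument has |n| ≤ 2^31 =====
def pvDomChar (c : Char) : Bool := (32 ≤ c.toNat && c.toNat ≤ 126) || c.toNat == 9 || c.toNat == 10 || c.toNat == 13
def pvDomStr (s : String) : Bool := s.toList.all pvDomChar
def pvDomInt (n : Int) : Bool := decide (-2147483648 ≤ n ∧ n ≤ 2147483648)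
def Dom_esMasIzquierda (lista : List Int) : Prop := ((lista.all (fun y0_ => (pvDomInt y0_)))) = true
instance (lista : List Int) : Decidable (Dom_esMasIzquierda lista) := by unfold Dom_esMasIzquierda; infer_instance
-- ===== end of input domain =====

-- B replaces A's top-down halving recursion (which re-sums both halves at every
-- level) by one bottom-up pass per level over pair sums: different algorithm, O(n) total work.

-- ===== PORT A =====
-- Literal transliteration of A; the 'length < 2' branch is a totality guard only:
-- there Python recurses forever (RecursionError), so those inputs are outside Pre_.
def esMasIzquierda (lista : List Int) : Bool :=
  if h2 : lista.length = 2 then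
    -- lista[0] > lista[1] (indices in range since length = 2)
    decide (((PySem.List.pyGet? lista 0).getD 0) > ((PySem.List.pyGet? lista 1).getD 0))
  else if hlt : lista.length < 2 then false
  else
    -- lista[:len//2] / lista[len//2:] with a nonnegative bound = take / drop
    let izq := lista.take (lista.length / 2)
    let der := lista.drop (lista.length / 2)
    if esMasIzquierda izq && esMasIzquierda der then decide (izq.sum > der.sum) else false
termination_by lista.length
decreasing_by
  · simp only [List.length_take]; omega
  · simp only [List.length_drop]; omega

-- ===== PORT B =====
-- one sweep of the inner for-loop: none = early 'return False', some sums otherwise.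
-- The catch-all arm covers [] (loop done) and the singleton [a], where Python B raises
-- IndexError on level[i+1]; that happens only outside Pre_, so 'some []' is a totality guard.
def pvLevelStep : List Int → Option (List Int)
  | a :: b :: rest => if a ≤ b then none else Option.map (fun s => (a + b) :: s) (pvLevelStep rest)
  | _ => some []

theorem pvLevelStep_length : ∀ (l s : List Int), pvLevelStep l = some s → s.length = l.length / 2 := by
  intro l
  induction l using pvLevelStep.induct with
  | case1 a b rest hab =>
    intro s hs; simp [pvLevelStep, hab] at hs
  | case2 a b rest hab ih =>
    intro s hs
    simp only [pvLevelStep, if_neg hab, Option.map_eq_some_iff] at hs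
    obtain ⟨s', hs', rfl⟩ := hs
    have := ih s' hs'
    simp [this]; omega
  | case3 l hne =>
    intro s hs
    match l, hne, hs with
    | [], _, hs => simp [pvLevelStep] at hs; subst hs; simp
    | [a], _, hs => simp [pvLevelStep] at hs; subst hs; simp
    | a :: b :: rest, hne, _ => exact absurd rfl (hne a b rest)

-- the while-loop of B
def pvLoop (level : List Int) : Bool :=
  if h : level.length > 1 then
    match hs : pvLevelStep level with
    | none => false
    | some s => pvLoop s
  else true
termination_by level.length
decreasing_by
  have := pvLevelStep_length level s hs
  omega

def esMasIzquierda_alt (lista : List Int) : Bool := pvLoop lista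

-- ===== PRECONDITION & SPEC =====
-- Pre_ excludes the inputs on which A's halving recursion raises RecursionError (its
-- left spine reaches a chunk of length 1 before any check fails) and the remaining
-- non-power-of-two inputs where A returns False only by a short-circuit deeper in the
-- recursion (B agrees there when both return, but A's termination set is not closed-form).
-- Admitted: power-of-two lengths (A total there), plus the lists whose length's halving
-- chain never hits 3 and whose leading pair already fails (A short-circuits to False).
def Pre_esMasIzquierda (lista : List Int) : Prop :=
  2 ≤ lista.length ∧
  (∀ k < lista.length, ¬ (3 * 2 ^ k ≤ lista.length ∧ lista.length < 4 * 2 ^ k)) ∧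
  (lista.length = 2 ^ Nat.log2 lista.length ∨ lista.getD 0 0 ≤ lista.getD 1 0)
instance (lista : List Int) : Decidable (Pre_esMasIzquierda lista) := by
  unfold Pre_esMasIzquierda; infer_instance

def pvWitness_esMasIzquierda : List Int := [3, 1, 2, 1]

def Spec_esMasIzquierda (lista : List Int) (out : Bool) : Prop := out = esMasIzquierda_alt lista
instance (lista : List Int) (out : Bool) : Decidable (Spec_esMasIzquierda lista out) := by
  unfold Spec_esMasIzquierda; infer_instance

-- ===== CLAIM (what is proved, stated in full; the proofs are below) =====
def Claim_equal_esMasIzquierda : Prop := ∀ (lista : List Int), Dom_esMasIzquierda lista → Pre_esMasIzquierda lista → Spec_esMasIzquierda lista (esMasIzquierda lista)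

-- ===== LEMMAS AND PROOFS =====

theorem pvLevelStep_sum : ∀ (l s : List Int), l.length % 2 = 0 → pvLevelStep l = some s → s.sum = l.sum := by
  intro l
  induction l using pvLevelStep.induct with
  | case1 a b rest hab => intro s _ hs; simp [pvLevelStep, hab] at hs
  | case2 a b rest hab ih =>
    intro s hpar hs
    simp only [pvLevelStep, if_neg hab, Option.map_eq_some_iff] at hs
    obtain ⟨s', hs', rfl⟩ := hs
    have hp : rest.length % 2 = 0 := by simp at hpar; omega
    have := ih s' hp hs'
    simp [this]; ring
  | case3 l hne =>
    intro s hpar hs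
    match l, hne, hpar, hs with
    | [], _, _, hs => simp [pvLevelStep] at hs; subst hs; simp
    | [a], _, hpar, _ => simp at hpar
    | a :: b :: rest, hne, _, _ => exact absurd rfl (hne a b rest)

theorem pvLevelStep_append : ∀ (l1 l2 : List Int), l1.length % 2 = 0 →
    pvLevelStep (l1 ++ l2) =
      (pvLevelStep l1).bind (fun s1 => Option.map (fun s2 => s1 ++ s2) (pvLevelStep l2)) := by
  intro l1
  induction l1 using pvLevelStep.induct with
  | case1 a b rest hab =>
    intro l2 hpar
    simp [pvLevelStep, hab]
  | case2 a b rest hab ih =>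
    intro l2 hpar
    have hp : rest.length % 2 = 0 := by simp at hpar; omega
    simp only [List.cons_append, pvLevelStep, if_neg hab, ih l2 hp]
    cases pvLevelStep rest with
    | none => simp
    | some s1 => cases pvLevelStep l2 <;> simp
  | case3 l hne =>
    intro l2 hpar
    match l, hne, hpar with
    | [], _, _ => simp [pvLevelStep]
    | [a], _, hpar => simp at hpar
    | a :: b :: rest, hne, _ => exact absurd rfl (hne a b rest)

-- unfolding equations for pvLoop
theorem pvLoop_of_short (l : List Int) (h : ¬ l.length > 1) : pvLoop l = true := by
  rw [pvLoop]; simp [h]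

theorem pvLoop_of_none (l : List Int) (h : l.length > 1) (hs : pvLevelStep l = none) :
    pvLoop l = false := by
  rw [pvLoop]; simp only [h, dite_true]; split <;> simp_all

theorem pvLoop_of_some (l : List Int) (h : l.length > 1) (s : List Int)
    (hs : pvLevelStep l = some s) : pvLoop l = pvLoop s := by
  rw [pvLoop]; simp only [dif_pos h]; split <;> simp_all

-- key lemma: B on the concatenation of two 2^k-length halves
theorem pvLoop_append : ∀ (k : Nat) (l1 l2 : List Int),
    l1.length = 2 ^ k → l2.length = 2 ^ k →
    pvLoop (l1 ++ l2) = (pvLoop l1 && (pvLoop l2 && decide (l1.sum > l2.sum))) := by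
  intro k
  induction k with
  | zero =>
    intro l1 l2 h1 h2
    match l1, l2, h1, h2 with
    | [a], [b], _, _ =>
      have hlen : ([a] ++ [b] : List Int).length > 1 := by simp
      by_cases hab : a ≤ b
      · have : pvLevelStep ([a] ++ [b]) = none := by simp [pvLevelStep, hab]
        rw [pvLoop_of_none _ hlen this]
        simp [pvLoop_of_short [a] (by simp), pvLoop_of_short [b] (by simp)]
        omega
      · have : pvLevelStep ([a] ++ [b]) = some [a + b] := by simp [pvLevelStep, hab]
        rw [pvLoop_of_some _ hlen _ this, pvLoop_of_short [a + b] (by simp),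
          pvLoop_of_short [a] (by simp), pvLoop_of_short [b] (by simp)]
        simp; omega
  | succ k ih =>
    intro l1 l2 h1 h2
    have hpar : l1.length % 2 = 0 := by rw [h1]; simp [Nat.pow_succ, Nat.mul_mod_left]
    have hl1 : l1.length > 1 := by rw [h1]; exact Nat.one_lt_two_pow (by omega)
    have hl2 : l2.length > 1 := by rw [h2]; exact Nat.one_lt_two_pow (by omega)
    have hl12 : (l1 ++ l2).length > 1 := by simp [List.length_append]; omega
    cases hs1 : pvLevelStep l1 with
    | none =>
      have : pvLevelStep (l1 ++ l2) = none := by rw [pvLevelStep_append l1 l2 hpar, hs1]; rfl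
      rw [pvLoop_of_none _ hl12 this, pvLoop_of_none _ hl1 hs1]; simp
    | some s1 =>
      cases hs2 : pvLevelStep l2 with
      | none =>
        have : pvLevelStep (l1 ++ l2) = none := by
          rw [pvLevelStep_append l1 l2 hpar, hs1, hs2]; rfl
        rw [pvLoop_of_none _ hl12 this, pvLoop_of_none _ hl2 hs2]; simp
      | some s2 =>
        have hcomb : pvLevelStep (l1 ++ l2) = some (s1 ++ s2) := by
          rw [pvLevelStep_append l1 l2 hpar, hs1, hs2]; rfl
        have hlen1 : s1.length = 2 ^ k := by
          have := pvLevelStep_length l1 s1 hs1; rw [h1] at this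
          simpa [Nat.pow_succ, Nat.mul_div_cancel] using this
        have hlen2 : s2.length = 2 ^ k := by
          have := pvLevelStep_length l2 s2 hs2; rw [h2] at this
          simpa [Nat.pow_succ, Nat.mul_div_cancel] using this
        have hpar2 : l2.length % 2 = 0 := by rw [h2]; simp [Nat.pow_succ, Nat.mul_mod_left]
        have hsum1 : s1.sum = l1.sum := pvLevelStep_sum l1 s1 hpar hs1
        have hsum2 : s2.sum = l2.sum := pvLevelStep_sum l2 s2 hpar2 hs2
        rw [pvLoop_of_some _ hl12 _ hcomb, pvLoop_of_some _ hl1 _ hs1,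
          pvLoop_of_some _ hl2 _ hs2, ih s1 s2 hlen1 hlen2, hsum1, hsum2]

-- unfolding A on a list of length ≥ 3
theorem esMasIzquierda_of_big (l : List Int) (h : l.length ≥ 3) :
    esMasIzquierda l =
      (if esMasIzquierda (l.take (l.length / 2)) && esMasIzquierda (l.drop (l.length / 2))
       then decide ((l.take (l.length / 2)).sum > (l.drop (l.length / 2)).sum) else false) := by
  rw [esMasIzquierda]
  have h2 : ¬ l.length = 2 := by omega
  have hlt : ¬ l.length < 2 := by omega
  simp [h2, hlt]

-- A agrees with B's loop on every list of length 2^(k+1)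
theorem main_lemma : ∀ (k : Nat) (l : List Int), l.length = 2 ^ (k + 1) →
    esMasIzquierda l = pvLoop l := by
  intro k
  induction k with
  | zero =>
    intro l hl
    match l, hl with
    | [a, b], _ =>
      rw [esMasIzquierda]
      have hlen : ([a, b] : List Int).length > 1 := by simp
      by_cases hab : a ≤ b
      · have : pvLevelStep [a, b] = none := by simp [pvLevelStep, hab]
        rw [pvLoop_of_none _ hlen this]
        simp [PySem.List.pyGet?, PySem.List.pyIdx?]; omega
      · have : pvLevelStep [a, b] = some [a + b] := by simp [pvLevelStep, hab]
        rw [pvLoop_of_some _ hlen _ this, pvLoop_of_short [a + b] (by simp)]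
        simp [PySem.List.pyGet?, PySem.List.pyIdx?]; omega
  | succ k ih =>
    intro l hl
    have hge : l.length ≥ 3 := by
      rw [hl]; have := Nat.one_lt_two_pow (n := k + 1) (by omega)
      calc 3 ≤ 2 ^ 2 := by norm_num
        _ ≤ 2 ^ (k + 2) := Nat.pow_le_pow_right (by norm_num) (by omega)
    have hhalf : l.length / 2 = 2 ^ (k + 1) := by
      rw [hl, Nat.pow_succ, Nat.mul_div_cancel _ (by norm_num)]
    have htake : (l.take (l.length / 2)).length = 2 ^ (k + 1) := by
      simp [List.length_take]; omega
    have hdrop : (l.drop (l.length / 2)).length = 2 ^ (k + 1) := by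
      simp [List.length_drop, hl, Nat.pow_succ]; omega
    rw [esMasIzquierda_of_big l hge, ih _ htake, ih _ hdrop]
    have hsplit : l = l.take (l.length / 2) ++ l.drop (l.length / 2) :=
      (List.take_append_drop _ l).symm
    conv_rhs => rw [hsplit]
    rw [pvLoop_append (k + 1) _ _ htake hdrop]
    cases pvLoop (l.take (l.length / 2)) <;> cases pvLoop (l.drop (l.length / 2)) <;> simp

-- B returns False as soon as the leading pair fails
theorem pvLoop_false_of_le (a b : Int) (rest : List Int) (hab : a ≤ b) :
    pvLoop (a :: b :: rest) = false := by
  have h : (a :: b :: rest).length > 1 := by simp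
  have hs : pvLevelStep (a :: b :: rest) = none := by simp [pvLevelStep, hab]
  exact pvLoop_of_none _ h hs

-- A short-circuits to False down its left spine when the leading pair fails and the
-- halving chain of the length never hits 3 (so the spine reaches length 2, not 1)
theorem A_false_of_le : ∀ (n : Nat) (a b : Int) (rest : List Int),
    (a :: b :: rest).length = n → a ≤ b →
    (∀ k < n, ¬ (3 * 2 ^ k ≤ n ∧ n < 4 * 2 ^ k)) →
    esMasIzquierda (a :: b :: rest) = false := by
  intro n
  induction n using Nat.strong_induction_on with
  | _ n ih =>
    intro a b rest hn hab hsp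
    have hge : 2 ≤ n := by simp at hn; omega
    have hne3 : n ≠ 3 := by
      intro h3; exact hsp 0 (by omega) (by simp [h3])
    by_cases h2 : n = 2
    · have : rest = [] := by simp at hn; exact List.eq_nil_of_length_eq_zero (by omega)
      subst this
      rw [esMasIzquierda]
      simp [PySem.List.pyGet?, PySem.List.pyIdx?]
      omega
    · have h4 : 4 ≤ n := by omega
      have hbig : (a :: b :: rest).length ≥ 3 := by omega
      rw [esMasIzquierda_of_big _ hbig, hn]
      have hm2 : 2 ≤ n / 2 := by omega
      have htake : List.take (n / 2) (a :: b :: rest) = a :: b :: List.take (n / 2 - 2) rest := by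
        obtain ⟨m, hm⟩ : ∃ m, n / 2 = m + 2 := ⟨n / 2 - 2, by omega⟩
        simp [hm]
      have hlen : (a :: b :: List.take (n / 2 - 2) rest).length = n / 2 := by
        simp at hn ⊢; omega
      have hsp2 : ∀ k < n / 2, ¬ (3 * 2 ^ k ≤ n / 2 ∧ n / 2 < 4 * 2 ^ k) := by
        intro k hk ⟨hk1, hk2⟩
        have e : (2 : Nat) ^ (k + 1) = 2 * 2 ^ k := by ring
        exact hsp (k + 1) (by omega) (by rw [e]; omega)
      have hfalse : esMasIzquierda (a :: b :: List.take (n / 2 - 2) rest) = false :=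
        ih (n / 2) (by omega) a b _ hlen hab hsp2
      rw [htake, hfalse]
      simp

-- ===== VERDICT (by name: the statement is the Claim_ definition above) =====
theorem esMasIzquierda_spec : Claim_equal_esMasIzquierda := by
  intro lista _ hpre
  obtain ⟨hge, hsp, hd⟩ := hpre
  unfold Spec_esMasIzquierda esMasIzquierda_alt
  rcases hd with hpow | hab
  · have h0 : Nat.log2 lista.length ≠ 0 := by
      intro h0; rw [h0] at hpow; simp at hpow; omega
    have hsucc : Nat.log2 lista.length - 1 + 1 = Nat.log2 lista.length :=
      Nat.succ_pred_eq_of_pos (Nat.pos_of_ne_zero h0)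
    obtain ⟨k, hk⟩ : ∃ k, lista.length = 2 ^ (k + 1) :=
      ⟨Nat.log2 lista.length - 1, by rw [hsucc]; exact hpow⟩
    exact main_lemma k lista hk
  · match lista, hge, hsp, hab with
    | a :: b :: rest, hge, hsp, hab =>
      have hab' : a ≤ b := by simpa using hab
      rw [A_false_of_le ((a :: b :: rest).length) a b rest rfl hab' hsp,
        pvLoop_false_of_le a b rest hab']
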